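-- pv_equiv track=rewrite | github.com/sartak/canary | bin/build_corpus.py | generate_deletes
-- ===== SOURCE A (Python) =====
-- from typing import Dict, Set, List, Tuple, Optional
--
-- def generate_deletes(word: str, max_edit_distance: int = 2) -> Set[str]:
--     """Generate all possible deletes for a word up to max_edit_distance."""
--     deletes = set()
--
--     def generate_deletes_recursive(word: str, edit_distance: int):
--         deletes.add(word)
--         if edit_distance < max_edit_distance:
--             for i in range(len(word)):
--                 if len(word) > 1:  # Don't delete if it would make empty string
--                     delete = word[:i] + word[i+1:]
--                     if delete not in deletes:
--                         generate_deletes_recursive(delete, edit_distance + 1)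
--
--     generate_deletes_recursive(word, 0)
--     return deletes
-- ===== SOURCE B (Python) =====
-- def generate_deletes(word, max_edit_distance=2):
--     """Generate all possible deletes for a word up to max_edit_distance."""
--     deletes = set()
--     stack = [(word, 0)]
--     while stack:
--         w, ed = stack.pop()
--         if w in deletes:
--             continue
--         deletes.add(w)
--         if ed < max_edit_distance and len(w) > 1:
--             for i in reversed(range(len(w))):
--                 stack.append((w[:i] + w[i+1:], ed + 1))
--     return deletes
-- ===== Notes on version B (the rewrite author's own statement) =====
-- stated objective: alternative
-- what changed: Replaces the recursive closure mutating an outer set with a single iterative loop over an explicit work stack of (word, depth) pairs, with the seen-check done at pop time.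
import Mathlib
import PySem

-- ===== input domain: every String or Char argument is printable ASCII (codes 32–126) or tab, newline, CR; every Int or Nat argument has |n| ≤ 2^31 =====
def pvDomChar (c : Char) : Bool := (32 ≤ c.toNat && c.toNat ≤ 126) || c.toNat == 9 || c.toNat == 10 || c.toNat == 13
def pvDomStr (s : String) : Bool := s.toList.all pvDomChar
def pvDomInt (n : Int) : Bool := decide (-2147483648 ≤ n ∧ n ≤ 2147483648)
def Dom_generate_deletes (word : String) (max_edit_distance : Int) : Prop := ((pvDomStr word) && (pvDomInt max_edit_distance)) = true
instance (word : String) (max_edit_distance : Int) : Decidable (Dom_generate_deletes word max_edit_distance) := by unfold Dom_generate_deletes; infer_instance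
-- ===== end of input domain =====

-- B replaces A's recursive closure over a shared set with an explicit work-stack loop (alternative decomposition, same cost).
-- ===== PORT A =====
-- word[:i] + word[i+1:] for 0 ≤ i (exact: i is a loop index from range(len(word)))
def pvDel (w : List Char) (i : Nat) : List Char := w.take i ++ w.drop (i + 1)

-- the inner 'generate_deletes_recursive' closure; 'deletes' is threaded explicitly and
-- the call depth is guarded by a fuel (len(word) suffices: each recursive call is on a
-- word shorter by one, and a word of length ≤ 1 never recurses)
def genRecA (med : Int) : Nat → List Char → Int → PySem.Set String → PySem.Set String
  | 0, w, _, ds => PySem.Set.add ds (String.ofList w)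
  | fuel + 1, w, ed, ds =>
    let ds := PySem.Set.add ds (String.ofList w)
    if ed < med then
      -- 'for i in range(len(word)): …' mutating 'deletes' is a foldl over the indices
      (List.range w.length).foldl (fun ds i =>
        if 1 < w.length then
          let d := pvDel w i
          if PySem.Set.contains ds (String.ofList d) then ds
          else genRecA med fuel d (ed + 1) ds
        else ds) ds
    else ds

def generate_deletes (word : String) (max_edit_distance : Int) : List String :=
  genRecA max_edit_distance word.toList.length word.toList 0 PySem.Set.empty

-- ===== PORT B =====
-- the while loop over the explicit stack (head of the list = top of the stack); the
-- iteration count is guarded by a fuel ((len(word)+1)! bounds the total number of pops)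
def genLoopB (med : Int) : Nat → List (List Char × Int) → PySem.Set String → PySem.Set String
  | _, [], ds => ds
  | 0, _ :: _, ds => ds
  | fuel + 1, (w, ed) :: rest, ds =>
    if PySem.Set.contains ds (String.ofList w) then genLoopB med fuel rest ds
    else
      let ds := PySem.Set.add ds (String.ofList w)
      if ed < med ∧ 1 < w.length then
        -- appending children for i = len-1 … 0 puts child 0 on top of the stack
        genLoopB med fuel ((List.range w.length).map (fun i => (pvDel w i, ed + 1)) ++ rest) ds
      else genLoopB med fuel rest ds

def generate_deletes_alt (word : String) (max_edit_distance : Int) : List String :=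
  genLoopB max_edit_distance (Nat.factorial (word.toList.length + 1)) [(word.toList, 0)] PySem.Set.empty

-- ===== PRECONDITION & SPEC =====
def Spec_generate_deletes (word : String) (max_edit_distance : Int) (out : List String) : Prop := out = generate_deletes_alt word max_edit_distance
instance (word : String) (max_edit_distance : Int) (out : List String) : Decidable (Spec_generate_deletes word max_edit_distance out) := by unfold Spec_generate_deletes; infer_instance

-- ===== CLAIM (what is proved, stated in full; the proofs are below) =====
def Claim_equal_generate_deletes : Prop := ∀ (word : String) (max_edit_distance : Int), Dom_generate_deletes word max_edit_distance → Spec_generate_deletes word max_edit_distance (generate_deletes word max_edit_distance)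

-- ===== LEMMAS AND PROOFS =====

-- the measure bounding the number of iterations B's loop still needs
def pvMu (stack : List (List Char × Int)) : Nat :=
  (stack.map (fun p => Nat.factorial (p.1.length + 1))).sum

theorem contains_false {ds : PySem.Set String} {s : String} (h : s ∉ ds) :
    PySem.Set.contains ds s = false := by
  cases hc : PySem.Set.contains ds s
  · rfl
  · exact absurd ((PySem.Set.contains_iff _ _).mp hc) h

theorem pvMu_children (w : List Char) (ed : Int) :
    pvMu ((List.range w.length).map (fun i => (pvDel w i, ed + 1)))
      = w.length * Nat.factorial w.length := by
  unfold pvMu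
  rw [List.map_map]
  rw [List.map_congr_left (g := fun _ => Nat.factorial w.length)
    (by intro i hi
        have hi' := List.mem_range.mp hi
        have hl : (pvDel w i).length = w.length - 1 := by simp [pvDel]; omega
        simp only [Function.comp_apply, hl]
        congr 1
        omega)]
  simp [List.map_const', List.sum_replicate]

theorem pvMu_append (s t : List (List Char × Int)) : pvMu (s ++ t) = pvMu s + pvMu t := by
  simp [pvMu]

theorem pvMu_cons (w : List Char) (ed : Int) (rest : List (List Char × Int)) :
    pvMu ((w, ed) :: rest) = Nat.factorial (w.length + 1) + pvMu rest := by
  simp [pvMu]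

-- B's loop does not depend on the fuel, as long as there is enough of it
theorem genLoopB_fuel (med : Int) : ∀ (f g : Nat) (stack : List (List Char × Int))
    (ds : PySem.Set String), pvMu stack ≤ f → pvMu stack ≤ g →
    genLoopB med f stack ds = genLoopB med g stack ds := by
  intro f
  induction f with
  | zero =>
    intro g stack ds hf _
    match stack with
    | [] => cases g <;> rfl
    | (w, ed) :: rest =>
      exfalso
      have := Nat.factorial_pos (w.length + 1)
      rw [pvMu_cons] at hf
      omega
  | succ f ih =>
    intro g stack ds hf hg
    match stack with
    | [] => cases g <;> rfl
    | (w, ed) :: rest =>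
      have hfac := Nat.factorial_pos (w.length + 1)
      rw [pvMu_cons] at hf hg
      obtain ⟨g', rfl⟩ : ∃ g', g = g' + 1 := ⟨g - 1, by omega⟩
      rw [genLoopB, genLoopB]
      split
      · exact ih g' rest ds (by omega) (by omega)
      · split
        · refine ih g' _ _ ?_ ?_ <;>
          · rw [pvMu_append, pvMu_children]
            have h2 : w.length * Nat.factorial w.length + 1 ≤ Nat.factorial (w.length + 1) := by
              rw [Nat.factorial_succ]
              have := Nat.factorial_pos w.length
              nlinarith
            omega
        · exact ih g' rest _ (by omega) (by omega)

-- popping an unseen word and processing it equals running A's recursion on it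
theorem genB_pop (med : Int) : ∀ (fa : Nat) (w : List Char), w.length ≤ fa →
    ∀ (ed : Int) (ds : PySem.Set String) (rest : List (List Char × Int)) (fb fb' : Nat),
    pvMu ((w, ed) :: rest) ≤ fb → pvMu rest ≤ fb' → String.ofList w ∉ ds →
    genLoopB med fb ((w, ed) :: rest) ds
      = genLoopB med fb' rest (genRecA med fa w ed ds) := by
  intro fa
  induction fa with
  | zero =>
    intro w hw ed ds rest fb fb' hfb hfb' hmem
    have hwnil : w = [] := List.eq_nil_of_length_eq_zero (by omega)
    subst hwnil
    rw [pvMu_cons] at hfb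
    have h1 : ((([] : List Char)).length + 1).factorial = 1 := rfl
    rw [h1] at hfb
    obtain ⟨fb0, rfl⟩ : ∃ fb0, fb = fb0 + 1 := ⟨fb - 1, by omega⟩
    rw [genLoopB, if_neg (by rw [contains_false hmem]; exact Bool.false_ne_true),
      if_neg (by simp)]
    rw [genRecA]
    exact genLoopB_fuel med fb0 fb' rest _ (by omega) hfb'
  | succ fa ih =>
    intro w hw ed ds rest fb fb' hfb hfb' hmem
    have hfac := Nat.factorial_pos (w.length + 1)
    rw [pvMu_cons] at hfb
    obtain ⟨fb0, rfl⟩ : ∃ fb0, fb = fb0 + 1 := ⟨fb - 1, by omega⟩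
    rw [genLoopB, if_neg (by rw [contains_false hmem]; exact Bool.false_ne_true)]
    rw [genRecA]
    set ds1 := PySem.Set.add ds (String.ofList w) with hds1
    by_cases hed : ed < med
    · rw [if_pos hed]
      by_cases hlen : 1 < w.length
      · rw [if_pos ⟨hed, hlen⟩]
        -- the pushed children, processed one pop at a time, are A's for-loop
        have L2 : ∀ (is : List Nat) (ds2 : PySem.Set String) (g g' : Nat),
            (∀ i ∈ is, i < w.length) →
            pvMu (is.map (fun i => (pvDel w i, ed + 1)) ++ rest) ≤ g → pvMu rest ≤ g' →
            genLoopB med g (is.map (fun i => (pvDel w i, ed + 1)) ++ rest) ds2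
              = genLoopB med g' rest (is.foldl (fun ds i =>
                  if 1 < w.length then
                    let d := pvDel w i
                    if PySem.Set.contains ds (String.ofList d) then ds
                    else genRecA med fa d (ed + 1) ds
                  else ds) ds2) := by
          intro is
          induction is with
          | nil =>
            intro ds2 g g' _ hg hg'
            simp only [List.map_nil, List.nil_append, List.foldl_nil]
            exact genLoopB_fuel med g g' rest ds2 (by simpa using hg) hg'
          | cons i is ihis =>
            intro ds2 g g' hmemi hg hg'
            simp only [List.map_cons, List.cons_append] at hg
            simp only [List.map_cons, List.cons_append, List.foldl_cons]
            have hi : i < w.length := hmemi i (by simp)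
            have hdlen : (pvDel w i).length = w.length - 1 := by simp [pvDel]; omega
            have hdfac := Nat.factorial_pos ((pvDel w i).length + 1)
            rw [pvMu_cons] at hg
            rw [if_pos hlen]
            by_cases hc : String.ofList (pvDel w i) ∈ ds2
            · rw [if_pos ((PySem.Set.contains_iff _ _).mpr hc)]
              obtain ⟨g0, rfl⟩ : ∃ g0, g = g0 + 1 := ⟨g - 1, by omega⟩
              rw [genLoopB, if_pos ((PySem.Set.contains_iff _ _).mpr hc)]
              exact ihis ds2 g0 g' (fun j hj => hmemi j (by simp [hj])) (by omega) hg'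
            · rw [if_neg (by rw [contains_false hc]; exact Bool.false_ne_true)]
              rw [ih (pvDel w i) (by omega) (ed + 1) ds2
                (is.map (fun i => (pvDel w i, ed + 1)) ++ rest) g (g - 1)
                (by rw [pvMu_cons]; omega) (by omega) hc]
              exact ihis _ (g - 1) g' (fun j hj => hmemi j (by simp [hj])) (by omega) hg'
        have hmu : pvMu ((List.range w.length).map (fun i => (pvDel w i, ed + 1)) ++ rest)
            ≤ fb0 := by
          rw [pvMu_append, pvMu_children]
          have h2 : w.length * Nat.factorial w.length + 1 ≤ Nat.factorial (w.length + 1) := by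
            rw [Nat.factorial_succ]
            have := Nat.factorial_pos w.length
            nlinarith
          omega
        exact L2 (List.range w.length) ds1 fb0 fb' (fun i hi => List.mem_range.mp hi) hmu hfb'
      · rw [if_neg (by tauto)]
        have hnil : ∀ (l : List Nat) (ds2 : PySem.Set String),
            l.foldl (fun ds i =>
              if 1 < w.length then
                let d := pvDel w i
                if PySem.Set.contains ds (String.ofList d) then ds
                else genRecA med fa d (ed + 1) ds
              else ds) ds2 = ds2 := by
          intro l
          induction l with
          | nil => intro ds2; rfl
          | cons x xs ihx => intro ds2; rw [List.foldl_cons, if_neg hlen]; exact ihx ds2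
        rw [hnil]
        exact genLoopB_fuel med fb0 fb' rest ds1 (by omega) hfb'
    · rw [if_neg hed, if_neg (by tauto)]
      exact genLoopB_fuel med fb0 fb' rest ds1 (by omega) hfb'

-- ===== VERDICT (by name: the statement is the Claim_ definition above) =====
theorem generate_deletes_spec : Claim_equal_generate_deletes := by
  intro word med _
  unfold Spec_generate_deletes generate_deletes generate_deletes_alt
  rw [genB_pop med word.toList.length word.toList le_rfl 0 PySem.Set.empty []
    (Nat.factorial (word.toList.length + 1)) 0
    (by simp [pvMu]) (by simp [pvMu]) (by simp [PySem.Set.empty])]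
  rfl
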